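-- pv_equiv track=rewrite | github.com/Neltarim/python-learning | advanced/API/off_new.py | nutrient_to_dict
-- ===== SOURCE A (Python) =====
-- def nutrient_to_dict(str1):
--     dest = {
--         "salt"          : None,
--         "sugars"        : None,
--         "saturated-fat" : None,
--         "fat"           : None
--     }
--     word = ""
--     column = ""
--     value = ""
--
--     for char in str1:
--         if char != " " and char != ",":
--             word += char
--
--         elif char == " ":
--             column = word
--             word = ""
--
--         elif char == ",":
--             dest[column] = word
--             word = ""
--             column = ""
--
--     return dest
-- ===== SOURCE B (Python) =====
-- def nutrient_to_dict(str1):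
--     dest = {
--         "salt"          : None,
--         "sugars"        : None,
--         "saturated-fat" : None,
--         "fat"           : None
--     }
--     for part in str1.split(",")[:-1]:
--         toks = part.split(" ")
--         dest[toks[-2] if len(toks) > 1 else ""] = toks[-1]
--     return dest
-- ===== Notes on version B (the rewrite author's own statement) =====
-- stated objective: simpler
-- what changed: Replaced A's char-by-char state machine (word/column accumulators mutated per character) with up-front segmentation: split the string on commas, drop the uncommitted final segment, and for each committed segment split on spaces and take the last token as value and the token before it (or the empty key if there is none) as key.
import Mathlib
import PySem

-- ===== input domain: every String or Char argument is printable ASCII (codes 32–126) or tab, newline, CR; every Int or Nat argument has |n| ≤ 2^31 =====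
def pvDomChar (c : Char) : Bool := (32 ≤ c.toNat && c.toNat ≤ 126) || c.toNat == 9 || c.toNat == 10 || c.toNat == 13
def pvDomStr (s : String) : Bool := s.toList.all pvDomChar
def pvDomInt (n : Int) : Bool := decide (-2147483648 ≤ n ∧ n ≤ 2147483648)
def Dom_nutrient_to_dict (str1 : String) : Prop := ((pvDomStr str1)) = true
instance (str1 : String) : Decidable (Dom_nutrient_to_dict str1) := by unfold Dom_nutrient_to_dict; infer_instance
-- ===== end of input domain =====

-- ===== PORT A =====
-- B replaces A's char-by-char state machine by split(",")/split(" ") segmentation (objective: simpler).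
-- A's loop state (dest, word, column); word/column are kept as List Char (Python str += is exact here).
def nutrientInit : PySem.Dict String (Option String) :=
  PySem.Dict.ofList
    [("salt", none), ("sugars", none), ("saturated-fat", none), ("fat", none)]

def nutrientStepA (st : PySem.Dict String (Option String) × List Char × List Char)
    (char : Char) : PySem.Dict String (Option String) × List Char × List Char :=
  if char ≠ ' ' ∧ char ≠ ',' then (st.1, st.2.1 ++ [char], st.2.2)
  else if char = ' ' then (st.1, [], st.2.1)
  else (st.1.insert (String.ofList st.2.2) (some (String.ofList st.2.1)), [], [])

def nutrient_to_dict (str1 : String) : List (String × Option String) :=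
  (str1.toList.foldl nutrientStepA (nutrientInit, [], [])).1.items

-- ===== PORT B =====
-- loop body of B: key/value for one comma-terminated segment (part.split(" "); toks[-2] / toks[-1]);
-- toks is never empty, so toks[-1] cannot raise and pyGetD with default [] is exact.
def nutrientEntryB (part : List Char) : String × Option String :=
  let toks := PySem.Chars.splitOn part [' ']
  (String.ofList (if 1 < toks.length then PySem.List.pyGetD toks (-2) [] else []),
   some (String.ofList (PySem.List.pyGetD toks (-1) [])))

def nutrient_to_dict_alt (str1 : String) : List (String × Option String) :=
  -- str1.split(",") with a non-empty literal separator never raises: Chars.splitOn is exact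
  let parts := PySem.List.slice (PySem.Chars.splitOn str1.toList [',']) none (some (-1))  -- [:-1]
  (parts.foldl (fun d part => d.insert (nutrientEntryB part).1 (nutrientEntryB part).2)
    nutrientInit).items

-- ===== PRECONDITION & SPEC =====
def Spec_nutrient_to_dict (str1 : String) (out : List (String × Option String)) : Prop := out = nutrient_to_dict_alt str1
instance (str1 : String) (out : List (String × Option String)) : Decidable (Spec_nutrient_to_dict str1 out) := by unfold Spec_nutrient_to_dict; infer_instance

-- ===== CLAIM (what is proved, stated in full; the proofs are below) =====
def Claim_equal_nutrient_to_dict : Prop := ∀ (str1 : String), Dom_nutrient_to_dict str1 → Spec_nutrient_to_dict str1 (nutrient_to_dict str1)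

-- ===== LEMMAS AND PROOFS =====

-- splitOn structural facts (single-character separator), proved over splitOn.go's fuel
theorem nutrient_go_irrel (c : Char) (fuel fuel' : Nat) (l cur : List Char)
    (acc : List (List Char)) (h : l.length ≤ fuel) (h' : l.length ≤ fuel') :
    PySem.Chars.splitOn.go [c] fuel l cur acc = PySem.Chars.splitOn.go [c] fuel' l cur acc := by
  induction fuel generalizing fuel' l cur acc with
  | zero =>
    have : l = [] := by cases l <;> simp_all
    subst this
    cases fuel' <;> simp [PySem.Chars.splitOn.go]
  | succ fuel ih =>
    cases l with
    | nil => cases fuel' <;> simp [PySem.Chars.splitOn.go]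
    | cons ch rest =>
      cases fuel' with
      | zero => simp at h'
      | succ fuel' =>
        by_cases hc : ch = c
        · subst hc
          rw [show PySem.Chars.splitOn.go [ch] (fuel+1) (ch::rest) cur acc = PySem.Chars.splitOn.go [ch] fuel rest [] (cur.reverse::acc) by simp [PySem.Chars.splitOn.go, List.isPrefixOf],
              show PySem.Chars.splitOn.go [ch] (fuel'+1) (ch::rest) cur acc = PySem.Chars.splitOn.go [ch] fuel' rest [] (cur.reverse::acc) by simp [PySem.Chars.splitOn.go, List.isPrefixOf]]
          exact ih fuel' rest [] _ (by simp at h; omega) (by simp at h'; omega)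
        · rw [show PySem.Chars.splitOn.go [c] (fuel+1) (ch::rest) cur acc = PySem.Chars.splitOn.go [c] fuel rest (ch::cur) acc by simp [PySem.Chars.splitOn.go, List.isPrefixOf, Ne.symm hc],
              show PySem.Chars.splitOn.go [c] (fuel'+1) (ch::rest) cur acc = PySem.Chars.splitOn.go [c] fuel' rest (ch::cur) acc by simp [PySem.Chars.splitOn.go, List.isPrefixOf, Ne.symm hc]]
          exact ih fuel' rest (ch::cur) acc (by simp at h; omega) (by simp at h'; omega)

theorem nutrient_go_acc (c : Char) (fuel : Nat) (l cur : List Char) (acc : List (List Char)) :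
    PySem.Chars.splitOn.go [c] fuel l cur acc = acc.reverse ++ PySem.Chars.splitOn.go [c] fuel l cur [] := by
  induction fuel generalizing l cur acc with
  | zero => simp [PySem.Chars.splitOn.go]
  | succ fuel ih =>
    cases l with
    | nil => simp [PySem.Chars.splitOn.go]
    | cons ch rest =>
      by_cases hc : ch = c
      · subst hc
        rw [show ∀ acc, PySem.Chars.splitOn.go [ch] (fuel+1) (ch::rest) cur acc = PySem.Chars.splitOn.go [ch] fuel rest [] (cur.reverse::acc) from fun _ => by simp [PySem.Chars.splitOn.go, List.isPrefixOf]]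
        rw [show PySem.Chars.splitOn.go [ch] (fuel+1) (ch::rest) cur [] = PySem.Chars.splitOn.go [ch] fuel rest [] (cur.reverse::[]) by simp [PySem.Chars.splitOn.go, List.isPrefixOf]]
        rw [ih rest [] (cur.reverse::acc), ih rest [] [cur.reverse]]
        simp
      · rw [show PySem.Chars.splitOn.go [c] (fuel+1) (ch::rest) cur acc = PySem.Chars.splitOn.go [c] fuel rest (ch::cur) acc by simp [PySem.Chars.splitOn.go, List.isPrefixOf, Ne.symm hc],
              show PySem.Chars.splitOn.go [c] (fuel+1) (ch::rest) cur [] = PySem.Chars.splitOn.go [c] fuel rest (ch::cur) [] by simp [PySem.Chars.splitOn.go, List.isPrefixOf, Ne.symm hc]]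
        exact ih rest (ch::cur) acc

theorem nutrient_go_no_sep (c : Char) (fuel : Nat) (l cur : List Char) (acc : List (List Char))
    (h : c ∉ l) (hf : l.length ≤ fuel) :
    PySem.Chars.splitOn.go [c] fuel l cur acc = acc.reverse ++ [cur.reverse ++ l] := by
  induction fuel generalizing l cur acc with
  | zero =>
    have : l = [] := by cases l <;> simp_all
    subst this; simp [PySem.Chars.splitOn.go]
  | succ fuel ih =>
    cases l with
    | nil => simp [PySem.Chars.splitOn.go]
    | cons ch rest =>
      have hc : ch ≠ c := fun e => h (e ▸ List.mem_cons_self ..)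
      rw [show PySem.Chars.splitOn.go [c] (fuel+1) (ch::rest) cur acc = PySem.Chars.splitOn.go [c] fuel rest (ch::cur) acc by simp [PySem.Chars.splitOn.go, List.isPrefixOf, Ne.symm hc]]
      rw [ih rest (ch::cur) acc (fun m => h (List.mem_cons_of_mem _ m)) (by simp at hf; omega)]
      simp

theorem nutrient_splitOn_no_sep (c : Char) (l : List Char) (h : c ∉ l) :
    PySem.Chars.splitOn l [c] = [l] := by
  unfold PySem.Chars.splitOn
  rw [nutrient_go_no_sep c _ l [] [] h (by omega)]
  simp

theorem nutrient_splitOn_cons_sep (c : Char) (pre rest : List Char) (h : c ∉ pre) :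
    PySem.Chars.splitOn (pre ++ c :: rest) [c] = pre :: PySem.Chars.splitOn rest [c] := by
  unfold PySem.Chars.splitOn
  have key : ∀ fuel (cur : List Char) acc, (pre ++ c :: rest).length ≤ fuel → c ∉ pre →
      PySem.Chars.splitOn.go [c] fuel (pre ++ c :: rest) cur acc =
        PySem.Chars.splitOn.go [c] (rest.length + 1) rest [] ((cur.reverse ++ pre) :: acc) := by
    clear h
    induction pre with
    | nil =>
      intro fuel cur acc hf _
      cases fuel with
      | zero => simp at hf
      | succ fuel =>
        rw [show PySem.Chars.splitOn.go [c] (fuel+1) ([] ++ c::rest) cur acc = PySem.Chars.splitOn.go [c] fuel rest [] (cur.reverse::acc) by simp [PySem.Chars.splitOn.go, List.isPrefixOf]]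
        rw [nutrient_go_irrel c fuel (rest.length+1) rest [] _ (by simp at hf; omega) (by omega)]
        simp
    | cons ch pre' ih =>
      intro fuel cur acc hf hmem
      have hc : ch ≠ c := fun e => hmem (e ▸ List.mem_cons_self ..)
      cases fuel with
      | zero => simp at hf
      | succ fuel =>
        rw [show PySem.Chars.splitOn.go [c] (fuel+1) ((ch::pre') ++ c::rest) cur acc = PySem.Chars.splitOn.go [c] fuel (pre' ++ c::rest) (ch::cur) acc by simp [PySem.Chars.splitOn.go, List.isPrefixOf, Ne.symm hc]]
        rw [ih fuel (ch::cur) acc (by simp at hf ⊢; omega) (fun m => hmem (List.mem_cons_of_mem _ m))]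
        simp
  rw [key _ [] [] (by omega) h]
  rw [nutrient_go_acc c (rest.length+1) rest [] _]
  rw [nutrient_go_irrel c (rest.length+1) (rest.length+1+1) rest [] [] (by omega) (by omega)]
  simp

theorem nutrient_splitOn_ne_nil (c : Char) (l : List Char) :
    PySem.Chars.splitOn l [c] ≠ [] := by
  by_cases h : c ∈ l
  · obtain ⟨pre, rest, rfl, hp⟩ : ∃ pre rest, l = pre ++ c :: rest ∧ c ∉ pre := by
      induction l with
      | nil => simp at h
      | cons ch rest ih =>
        by_cases hc : ch = c
        · exact ⟨[], rest, by simp [hc], by simp⟩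
        · obtain ⟨p, r, e, hp⟩ := ih (by simp at h; tauto)
          exact ⟨ch::p, r, by simp [e], by simp [Ne.symm hc, hp]⟩
    rw [nutrient_splitOn_cons_sep c pre rest hp]; simp
  · rw [nutrient_splitOn_no_sep c l h]; simp
def nutrientLastD (ts : List (List Char)) : List Char := ts.getLast?.getD []
def nutrientPenultD (ts : List (List Char)) : List Char := ts.dropLast.getLast?.getD []

theorem nutrient_pyGetD_neg_one (ts : List (List Char)) (h : ts ≠ []) :
    PySem.List.pyGetD ts (-1) [] = nutrientLastD ts := by
  have hl : 0 < ts.length := List.length_pos_iff.mpr h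
  simp only [PySem.List.pyGetD, PySem.List.pyGet?, PySem.List.pyIdx?, nutrientLastD,
    List.getLast?_eq_getElem?]
  rw [if_neg (by omega), if_pos (by omega)]
  norm_num

theorem nutrient_pyGetD_neg_two (ts : List (List Char)) (h : 1 < ts.length) :
    PySem.List.pyGetD ts (-2) [] = nutrientPenultD ts := by
  simp only [PySem.List.pyGetD, PySem.List.pyGet?, PySem.List.pyIdx?, nutrientPenultD,
    List.getLast?_eq_getElem?]
  rw [if_neg (by omega), if_pos (by omega)]
  norm_num
  rw [List.getElem?_dropLast, if_pos (by omega)]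
  congr 2

-- first-occurrence decomposition
theorem nutrient_first_occ (c : Char) (l : List Char) (h : c ∈ l) :
    ∃ pre rest, l = pre ++ c :: rest ∧ c ∉ pre := by
  induction l with
  | nil => simp at h
  | cons ch rest ih =>
    by_cases hc : ch = c
    · exact ⟨[], rest, by simp [hc], by simp⟩
    · obtain ⟨p, r, e, hp⟩ := ih (by simp at h; tauto)
      exact ⟨ch::p, r, by simp [e], by simp [Ne.symm hc, hp]⟩

-- A's loop over characters that are neither space nor comma just extends word
theorem nutrient_foldA_plain (seg : List Char) (d : PySem.Dict String (Option String))
    (w col : List Char) (h : ∀ ch ∈ seg, ch ≠ ' ' ∧ ch ≠ ',') :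
    seg.foldl nutrientStepA (d, w, col) = (d, w ++ seg, col) := by
  induction seg generalizing w with
  | nil => simp
  | cons ch seg ih =>
    have hch := h ch (List.mem_cons_self ..)
    rw [List.foldl_cons, show nutrientStepA (d, w, col) ch = (d, w ++ [ch], col) by
      simp [nutrientStepA, hch.1, hch.2]]
    rw [ih (w ++ [ch]) (fun x m => h x (List.mem_cons_of_mem _ m))]
    simp

-- A's loop over one comma-free segment, characterised by the space-split of w ++ seg
theorem nutrient_foldA_seg (n : Nat) (seg : List Char) (d : PySem.Dict String (Option String))
    (w col : List Char) (hn : seg.length ≤ n) (hseg : ',' ∉ seg) (hw : ' ' ∉ w) (hwc : ',' ∉ w) :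
    seg.foldl nutrientStepA (d, w, col) =
      (d, nutrientLastD (PySem.Chars.splitOn (w ++ seg) [' ']),
       if (PySem.Chars.splitOn (w ++ seg) [' ']).length ≤ 1 then col
       else nutrientPenultD (PySem.Chars.splitOn (w ++ seg) [' '])) := by
  induction n generalizing seg w col with
  | zero =>
    have : seg = [] := by cases seg <;> simp_all
    subst this
    simp only [List.append_nil]
    rw [nutrient_splitOn_no_sep ' ' w hw]
    simp [nutrientLastD]
  | succ n ih =>
    by_cases hsp : ' ' ∈ seg
    · obtain ⟨p, r, rfl, hp⟩ := nutrient_first_occ ' ' seg hsp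
      have hpc : ',' ∉ p := fun m => hseg (by simp [m])
      have hrc : ',' ∉ r := fun m => hseg (by simp [m])
      rw [show p ++ ' ' :: r = (p ++ [' ']) ++ r by simp, List.foldl_append, List.foldl_append]
      rw [nutrient_foldA_plain p d w col (fun x m => ⟨fun e => hp (e ▸ m), fun e => hpc (e ▸ m)⟩)]
      rw [show List.foldl nutrientStepA (d, w ++ p, col) [' '] = (d, [], w ++ p) by
        simp [nutrientStepA]]
      rw [ih r [] (w ++ p) (by simp only [List.length_append, List.length_cons] at hn; omega) hrc (by simp) (by simp)]
      have hwp : ' ' ∉ w ++ p := by simp [hw, hp]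
      rw [show w ++ (p ++ [' '] ++ r) = (w ++ p) ++ ' ' :: r by simp]
      rw [nutrient_splitOn_cons_sep ' ' (w ++ p) r hwp]
      have hne := nutrient_splitOn_ne_nil ' ' r
      cases hsr : PySem.Chars.splitOn r [' '] with
      | nil => exact absurd hsr hne
      | cons t ts =>
        cases ts with
        | nil => simp [hsr, nutrientLastD, nutrientPenultD]
        | cons t2 ts2 =>
          simp [hsr, nutrientLastD, nutrientPenultD, List.dropLast_cons_of_ne_nil]
    · rw [nutrient_foldA_plain seg d w col (fun x m => ⟨fun e => hsp (e ▸ m), fun e => hseg (e ▸ m)⟩)]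
      rw [nutrient_splitOn_no_sep ' ' (w ++ seg) (by simp [hw, hsp])]
      simp [nutrientLastD]

-- the main correspondence: A's fold from a fresh word/column equals B's fold over the committed segments
theorem nutrient_main (n : Nat) (cs : List Char) (d : PySem.Dict String (Option String))
    (hn : cs.length ≤ n) :
    (cs.foldl nutrientStepA (d, [], [])).1 =
      (PySem.Chars.splitOn cs [',']).dropLast.foldl
        (fun d part => d.insert (nutrientEntryB part).1 (nutrientEntryB part).2) d := by
  induction n generalizing cs d with
  | zero =>
    have : cs = [] := by cases cs <;> simp_all
    subst this
    rw [nutrient_splitOn_no_sep ',' [] (by simp)]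
    simp
  | succ n ih =>
    by_cases hc : ',' ∈ cs
    · obtain ⟨p, r, rfl, hp⟩ := nutrient_first_occ ',' cs hc
      rw [show p ++ ',' :: r = (p ++ [',']) ++ r by simp, List.foldl_append, List.foldl_append]
      rw [nutrient_foldA_seg p.length p d [] [] le_rfl hp (by simp) (by simp)]
      simp only [List.nil_append]
      rw [show ∀ W C, List.foldl nutrientStepA (d, W, C) [','] =
            (d.insert (String.ofList C) (some (String.ofList W)), [], []) from fun W C => by
        simp [nutrientStepA]]
      rw [ih r _ (by simp only [List.length_append, List.length_cons] at hn; omega)]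
      rw [show p ++ [','] ++ r = p ++ ',' :: r by simp]
      rw [nutrient_splitOn_cons_sep ',' p r hp,
          List.dropLast_cons_of_ne_nil (nutrient_splitOn_ne_nil ',' r), List.foldl_cons]
      have hT := nutrient_splitOn_ne_nil ' ' p
      have hkey : (nutrientEntryB p).1 =
          String.ofList (if (PySem.Chars.splitOn p [' ']).length ≤ 1 then []
            else nutrientPenultD (PySem.Chars.splitOn p [' '])) := by
        unfold nutrientEntryB
        by_cases h1 : 1 < (PySem.Chars.splitOn p [' ']).length
        · simp only [h1, if_pos, if_neg (by omega : ¬ (PySem.Chars.splitOn p [' ']).length ≤ 1)]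
          rw [nutrient_pyGetD_neg_two _ h1]
        · simp only [if_neg h1, if_pos (by omega : (PySem.Chars.splitOn p [' ']).length ≤ 1)]
      have hval : (nutrientEntryB p).2 =
          some (String.ofList (nutrientLastD (PySem.Chars.splitOn p [' ']))) := by
        unfold nutrientEntryB
        simp only
        rw [nutrient_pyGetD_neg_one _ hT]
      rw [hkey, hval]
    · rw [nutrient_foldA_seg cs.length cs d [] [] le_rfl hc (by simp) (by simp)]
      rw [nutrient_splitOn_no_sep ',' cs hc]
      simp

-- ===== VERDICT (by name: the statement is the Claim_ definition above) =====
theorem nutrient_to_dict_spec : Claim_equal_nutrient_to_dict := by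
  intro str1 _
  unfold Spec_nutrient_to_dict nutrient_to_dict nutrient_to_dict_alt
  rw [nutrient_main str1.toList.length str1.toList nutrientInit le_rfl]
  simp [PySem.List.slice, List.dropLast_eq_take]
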